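-- pv_equiv track=rewrite | github.com/PHemarajata/afi_terra | scripts/compare_single_double_outputs.py | compare_validation
-- ===== SOURCE A (Python) =====
-- def normalize_text(value: str | None) -> str:
--     return (value or "").strip()
--
-- def normalize_taxa_csv(value: str | None) -> str:
--     items = [x.strip() for x in (value or "").split(",") if x.strip()]
--     return ",".join(sorted(set(items)))
--
-- def compare_validation(single: dict[str, dict[str, str]], double: dict[str, dict[str, str]]) -> list[dict[str, str]]:
--     all_samples = sorted(set(single) | set(double))
--     diffs: list[dict[str, str]] = []
--
--     for sample_id in all_samples:
--         s = single.get(sample_id)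
--         d = double.get(sample_id)
--
--         if s is None:
--             diffs.append({"sample_id": sample_id, "status": "only_in_double"})
--             continue
--         if d is None:
--             diffs.append({"sample_id": sample_id, "status": "only_in_single"})
--             continue
--
--         s_taxa = normalize_taxa_csv(s.get("detected_taxa"))
--         d_taxa = normalize_taxa_csv(d.get("detected_taxa"))
--         s_result = normalize_text(s.get("validation_result"))
--         d_result = normalize_text(d.get("validation_result"))
--
--         if s_taxa != d_taxa or s_result != d_result:
--             diffs.append(
--                 {
--                     "sample_id": sample_id,
--                     "status": "changed",
--                     "single_validation_result": s_result,
--                     "double_validation_result": d_result,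
--                     "single_detected_taxa": s_taxa,
--                     "double_detected_taxa": d_taxa,
--                     "single_sample_type": normalize_text(s.get("sample_type")),
--                     "double_sample_type": normalize_text(d.get("sample_type")),
--                     "expected_taxon": normalize_text(s.get("expected_taxon") or d.get("expected_taxon")),
--                 }
--             )
--
--     return diffs
-- ===== SOURCE B (Python) =====
-- def normalize_text(value):
--     return (value or "").strip()
--
-- def normalize_taxa_csv(value):
--     items = [x.strip() for x in (value or "").split(",") if x.strip()]
--     return ",".join(sorted(set(items)))
--
-- def _norm_pair(rec):
--     return (normalize_taxa_csv(rec.get("detected_taxa")),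
--             normalize_text(rec.get("validation_result")))
--
-- def _changed(sample_id, s, d):
--     if _norm_pair(s) == _norm_pair(d):
--         return []
--     s_taxa, s_result = _norm_pair(s)
--     d_taxa, d_result = _norm_pair(d)
--     return [{
--         "sample_id": sample_id,
--         "status": "changed",
--         "single_validation_result": s_result,
--         "double_validation_result": d_result,
--         "single_detected_taxa": s_taxa,
--         "double_detected_taxa": d_taxa,
--         "single_sample_type": normalize_text(s.get("sample_type")),
--         "double_sample_type": normalize_text(d.get("sample_type")),
--         "expected_taxon": normalize_text(s.get("expected_taxon") or d.get("expected_taxon")),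
--     }]
--
-- def compare_validation(single, double):
--     # merge join over the two sorted key lists: no union set, no post-hoc sort
--     sk = sorted(set(single))
--     dk = sorted(set(double))
--     out = []
--     i = j = 0
--     while i < len(sk) or j < len(dk):
--         if j == len(dk) or (i < len(sk) and sk[i] < dk[j]):
--             out.append({"sample_id": sk[i], "status": "only_in_single"})
--             i += 1
--         elif i == len(sk) or dk[j] < sk[i]:
--             out.append({"sample_id": dk[j], "status": "only_in_double"})
--             j += 1
--         else:
--             out.extend(_changed(sk[i], single[sk[i]], double[dk[j]]))
--             i += 1
--             j += 1
--     return out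
-- ===== Notes on version B (the rewrite author's own statement) =====
-- stated objective: alternative
-- what changed: B replaces A's loop over the sorted union of the two key sets by a two-pointer merge join of the two independently sorted key lists, emitting only_in_single/only_in_double/changed records in order as the pointers advance, so the union set and its membership lookups disappear.
import Mathlib
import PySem

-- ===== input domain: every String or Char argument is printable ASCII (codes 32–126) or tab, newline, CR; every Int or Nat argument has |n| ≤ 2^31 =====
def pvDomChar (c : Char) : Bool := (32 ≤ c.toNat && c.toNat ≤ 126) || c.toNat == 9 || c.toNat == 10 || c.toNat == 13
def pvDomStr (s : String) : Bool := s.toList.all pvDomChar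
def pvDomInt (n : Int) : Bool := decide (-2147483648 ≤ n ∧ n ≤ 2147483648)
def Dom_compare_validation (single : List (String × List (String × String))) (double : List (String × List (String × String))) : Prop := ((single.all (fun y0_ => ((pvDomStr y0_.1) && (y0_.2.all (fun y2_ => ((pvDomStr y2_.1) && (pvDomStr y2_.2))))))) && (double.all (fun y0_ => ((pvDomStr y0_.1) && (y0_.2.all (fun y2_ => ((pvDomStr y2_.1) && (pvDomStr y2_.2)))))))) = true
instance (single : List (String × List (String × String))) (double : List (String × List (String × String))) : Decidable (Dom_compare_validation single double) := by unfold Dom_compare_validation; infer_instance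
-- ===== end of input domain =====

-- B replaces A's loop over the sorted key union by a two-pointer merge join of the two
-- independently sorted key lists (objective: alternative algorithm; same output since the
-- merge visits the union's keys in the same sorted order, one record group per key).

-- shared helpers (module-level Python helpers used by both A and B)

-- normalize_text(value) = (value or "").strip()
def pvNormText (v : Option String) : String := PySem.Str.strip (v.getD "")

-- normalize_taxa_csv(value); split? never returns none since the separator "," is non-empty
def pvNormTaxa (v : Option String) : String :=
  let items := (((PySem.Str.split? (v.getD "") ",").getD []).map PySem.Str.strip).filter (fun x => !(x == ""))
  PySem.Str.join "," (PySem.List.sorted (PySem.Set.ofList items) (fun x => x))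

-- Python's `a or b` on two Optional[str] operands (None and "" are falsy)
def pvOrOpt (a b : Option String) : Option String :=
  match a with
  | some v => if v == "" then b else some v
  | none => b

-- ===== PORT A =====
def compare_validation (single : List (String × List (String × String))) (double : List (String × List (String × String))) : List (List (String × String)) :=
  let all_samples := PySem.List.sorted (PySem.Set.union (PySem.Set.ofList (single.map (fun p => p.1))) (PySem.Set.ofList (double.map (fun p => p.1)))) (fun x => x)
  all_samples.foldl (fun diffs sample_id =>
    match (PySem.Dict.mk single).get? sample_id, (PySem.Dict.mk double).get? sample_id with
    | none, _ => diffs ++ [[("sample_id", sample_id), ("status", "only_in_double")]]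
    | some _, none => diffs ++ [[("sample_id", sample_id), ("status", "only_in_single")]]
    | some s, some d =>
      let s_taxa := pvNormTaxa ((PySem.Dict.mk s).get? "detected_taxa")
      let d_taxa := pvNormTaxa ((PySem.Dict.mk d).get? "detected_taxa")
      let s_result := pvNormText ((PySem.Dict.mk s).get? "validation_result")
      let d_result := pvNormText ((PySem.Dict.mk d).get? "validation_result")
      if s_taxa ≠ d_taxa ∨ s_result ≠ d_result then
        diffs ++ [[("sample_id", sample_id), ("status", "changed"),
          ("single_validation_result", s_result), ("double_validation_result", d_result),
          ("single_detected_taxa", s_taxa), ("double_detected_taxa", d_taxa),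
          ("single_sample_type", pvNormText ((PySem.Dict.mk s).get? "sample_type")),
          ("double_sample_type", pvNormText ((PySem.Dict.mk d).get? "sample_type")),
          ("expected_taxon", pvNormText (pvOrOpt ((PySem.Dict.mk s).get? "expected_taxon") ((PySem.Dict.mk d).get? "expected_taxon")))]]
      else diffs) []

-- ===== PORT B =====

-- _norm_pair(rec): the (normalized taxa, normalized result) pair of one record
def pvNormPair (rec : List (String × String)) : String × String :=
  (pvNormTaxa ((PySem.Dict.mk rec).get? "detected_taxa"),
   pvNormText ((PySem.Dict.mk rec).get? "validation_result"))

-- _changed(sample_id, s, d): [] when the normalized pairs agree, else the one 'changed' record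
def pvChanged (sample_id : String) (s d : List (String × String)) : List (List (String × String)) :=
  if pvNormPair s = pvNormPair d then []
  else [[("sample_id", sample_id), ("status", "changed"),
    ("single_validation_result", (pvNormPair s).2), ("double_validation_result", (pvNormPair d).2),
    ("single_detected_taxa", (pvNormPair s).1), ("double_detected_taxa", (pvNormPair d).1),
    ("single_sample_type", pvNormText ((PySem.Dict.mk s).get? "sample_type")),
    ("double_sample_type", pvNormText ((PySem.Dict.mk d).get? "sample_type")),
    ("expected_taxon", pvNormText (pvOrOpt ((PySem.Dict.mk s).get? "expected_taxon") ((PySem.Dict.mk d).get? "expected_taxon")))]]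

-- the while-loop of B: two-pointer merge over the remaining suffixes of the sorted key lists
def pvMergeRows (single double : List (String × List (String × String))) : List String → List String → List (List (String × String))
  | [], [] => []
  | i :: sk, [] => [("sample_id", i), ("status", "only_in_single")] :: pvMergeRows single double sk []
  | [], j :: dk => [("sample_id", j), ("status", "only_in_double")] :: pvMergeRows single double [] dk
  | i :: sk, j :: dk =>
    if i < j then
      [("sample_id", i), ("status", "only_in_single")] :: pvMergeRows single double sk (j :: dk)
    else if j < i then
      [("sample_id", j), ("status", "only_in_double")] :: pvMergeRows single double (i :: sk) dk
    else
      pvChanged i ((PySem.Dict.mk single).getD i []) ((PySem.Dict.mk double).getD j []) ++ pvMergeRows single double sk dk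

def compare_validation_alt (single : List (String × List (String × String))) (double : List (String × List (String × String))) : List (List (String × String)) :=
  pvMergeRows single double
    (PySem.List.sorted (PySem.Set.ofList (single.map (fun p => p.1))) (fun x => x))
    (PySem.List.sorted (PySem.Set.ofList (double.map (fun p => p.1))) (fun x => x))

-- ===== PRECONDITION & SPEC =====
def Spec_compare_validation (single : List (String × List (String × String))) (double : List (String × List (String × String))) (out : List (List (String × String))) : Prop := out = compare_validation_alt single double
instance (single : List (String × List (String × String))) (double : List (String × List (String × String))) (out : List (List (String × String))) : Decidable (Spec_compare_validation single double out) := by unfold Spec_compare_validation; infer_instance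

-- ===== CLAIM (what is proved, stated in full; the proofs are below) =====
def Claim_equal_compare_validation : Prop := ∀ (single : List (String × List (String × String))) (double : List (String × List (String × String))), Dom_compare_validation single double → Spec_compare_validation single double (compare_validation single double)

-- ===== LEMMAS AND PROOFS =====

-- proof-side names for the three record shapes and A's per-key step
def pvRecD (k : String) : List (String × String) := [("sample_id", k), ("status", "only_in_double")]
def pvRecS (k : String) : List (String × String) := [("sample_id", k), ("status", "only_in_single")]

def pvStepA (single double : List (String × List (String × String))) (k : String) : List (List (String × String)) :=
  match (PySem.Dict.mk single).get? k, (PySem.Dict.mk double).get? k with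
  | none, _ => [pvRecD k]
  | some _, none => [pvRecS k]
  | some s, some d => pvChanged k s d

-- A's loop is a flatMap of pvStepA over the sorted key union
lemma pvA_eq_flatMap (single double : List (String × List (String × String))) :
    compare_validation single double =
      (PySem.List.sorted (PySem.Set.union (PySem.Set.ofList (single.map (fun p => p.1))) (PySem.Set.ofList (double.map (fun p => p.1)))) (fun x => x)).flatMap (pvStepA single double) := by
  unfold compare_validation
  have hbody : (fun (diffs : List (List (String × String))) (sample_id : String) =>
      match (PySem.Dict.mk single).get? sample_id, (PySem.Dict.mk double).get? sample_id with
      | none, _ => diffs ++ [[("sample_id", sample_id), ("status", "only_in_double")]]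
      | some _, none => diffs ++ [[("sample_id", sample_id), ("status", "only_in_single")]]
      | some s, some d =>
        let s_taxa := pvNormTaxa ((PySem.Dict.mk s).get? "detected_taxa")
        let d_taxa := pvNormTaxa ((PySem.Dict.mk d).get? "detected_taxa")
        let s_result := pvNormText ((PySem.Dict.mk s).get? "validation_result")
        let d_result := pvNormText ((PySem.Dict.mk d).get? "validation_result")
        if s_taxa ≠ d_taxa ∨ s_result ≠ d_result then
          diffs ++ [[("sample_id", sample_id), ("status", "changed"),
            ("single_validation_result", s_result), ("double_validation_result", d_result),
            ("single_detected_taxa", s_taxa), ("double_detected_taxa", d_taxa),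
            ("single_sample_type", pvNormText ((PySem.Dict.mk s).get? "sample_type")),
            ("double_sample_type", pvNormText ((PySem.Dict.mk d).get? "sample_type")),
            ("expected_taxon", pvNormText (pvOrOpt ((PySem.Dict.mk s).get? "expected_taxon") ((PySem.Dict.mk d).get? "expected_taxon")))]]
        else diffs)
      = (fun diffs k => diffs ++ pvStepA single double k) := by
    funext diffs k
    unfold pvStepA pvRecD pvRecS
    rcases (PySem.Dict.mk single).get? k with _ | s <;>
      rcases (PySem.Dict.mk double).get? k with _ | d <;> simp
    by_cases h : pvNormPair s = pvNormPair d
    · have h' := h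
      simp only [pvNormPair, Prod.mk.injEq] at h'
      simp [pvChanged, h, h'.1, h'.2]
    · have h' : pvNormTaxa ((PySem.Dict.mk s).get? "detected_taxa") ≠ pvNormTaxa ((PySem.Dict.mk d).get? "detected_taxa") ∨
          pvNormText ((PySem.Dict.mk s).get? "validation_result") ≠ pvNormText ((PySem.Dict.mk d).get? "validation_result") := by
        by_contra hc
        push Not at hc
        exact h (by simp [pvNormPair, hc.1, hc.2])
      simp [pvChanged, h', pvNormPair]
      intro h1
      rcases h' with h' | h'
      · exact absurd h1 h'
      · exact h'
  rw [hbody, PySem.List.foldl_append_eq_flatMap]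
  simp

-- key-list merge (proof-side skeleton of pvMergeRows)
def pvMergeKeys : List String → List String → List String
  | [], d => d
  | s, [] => s
  | i :: s, j :: d =>
    if i < j then i :: pvMergeKeys s (j :: d)
    else if j < i then j :: pvMergeKeys (i :: s) d
    else i :: pvMergeKeys s d

lemma pvMergeKeys_nil_left (d : List String) : pvMergeKeys [] d = d := by
  cases d <;> simp [pvMergeKeys]

lemma pvMergeKeys_nil_right (s : List String) : pvMergeKeys s [] = s := by
  cases s <;> simp [pvMergeKeys]

lemma pv_mem_mergeKeys (s d : List String) (k : String) :
    k ∈ pvMergeKeys s d ↔ k ∈ s ∨ k ∈ d := by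
  fun_induction pvMergeKeys s d with
  | case1 d => simp
  | case2 i s => simp
  | case3 i s j d hij ih => simp [ih]; tauto
  | case4 i s j d hij hji ih => simp [ih]; tauto
  | case5 i s j d hij hji ih =>
    have hej : i = j := le_antisymm (not_lt.mp hji) (not_lt.mp hij)
    subst hej
    simp [ih]; tauto

lemma pv_mergeKeys_pairwise (s d : List String) :
    s.Pairwise (· < ·) → d.Pairwise (· < ·) → (pvMergeKeys s d).Pairwise (· < ·) := by
  fun_induction pvMergeKeys s d with
  | case1 d => intro _ hd; exact hd
  | case2 i s => intro hs _; exact hs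
  | case3 i s j d hij ih =>
    intro hs hd
    obtain ⟨hsi, hs'⟩ := List.pairwise_cons.mp hs
    refine List.pairwise_cons.mpr ⟨?_, ih hs' hd⟩
    intro k hk
    rcases (pv_mem_mergeKeys s (j :: d) k).mp hk with hk | hk
    · exact hsi k hk
    · rcases List.mem_cons.mp hk with rfl | hk
      · exact hij
      · exact hij.trans ((List.pairwise_cons.mp hd).1 k hk)
  | case4 i s j d hij hji ih =>
    intro hs hd
    obtain ⟨hdj, hd'⟩ := List.pairwise_cons.mp hd
    refine List.pairwise_cons.mpr ⟨?_, ih hs hd'⟩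
    intro k hk
    rcases (pv_mem_mergeKeys (i :: s) d k).mp hk with hk | hk
    · rcases List.mem_cons.mp hk with rfl | hk
      · exact hji
      · exact hji.trans ((List.pairwise_cons.mp hs).1 k hk)
    · exact hdj k hk
  | case5 i s j d hij hji ih =>
    intro hs hd
    have hej : i = j := le_antisymm (not_lt.mp hji) (not_lt.mp hij)
    subst hej
    obtain ⟨hsi, hs'⟩ := List.pairwise_cons.mp hs
    obtain ⟨hdi, hd'⟩ := List.pairwise_cons.mp hd
    refine List.pairwise_cons.mpr ⟨?_, ih hs' hd'⟩
    intro k hk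
    rcases (pv_mem_mergeKeys s d k).mp hk with hk | hk
    · exact hsi k hk
    · exact hdi k hk

lemma pv_contains_mem (s : List String) (x : String) :
    PySem.Set.contains s x = decide (x ∈ s) := by
  simp

lemma pv_contains_filter_drop (s d : List String) (i : String)
    (hlt : ∀ k ∈ d, i < k) :
    d.filter (fun x => !(PySem.Set.contains (i :: s) x)) = d.filter (fun x => !(PySem.Set.contains s x)) := by
  refine List.filter_congr ?_
  intro k hk
  have : k ≠ i := ne_of_gt (hlt k hk)
  simp [this]

lemma pv_mergeKeys_perm (s d : List String) :
    s.Pairwise (· < ·) → d.Pairwise (· < ·) →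
    (pvMergeKeys s d).Perm (s ++ d.filter (fun x => !(PySem.Set.contains s x))) := by
  fun_induction pvMergeKeys s d with
  | case1 d =>
    intro _ _
    simp
  | case2 i s => intro _ _; simp
  | case3 i s j d hij ih =>
    intro hs hd
    obtain ⟨hsi, hs'⟩ := List.pairwise_cons.mp hs
    obtain ⟨hdj, hd'⟩ := List.pairwise_cons.mp hd
    have hlt : ∀ k ∈ j :: d, i < k := by
      intro k hk
      rcases List.mem_cons.mp hk with rfl | hk
      · exact hij
      · exact hij.trans (hdj k hk)
    rw [List.cons_append, pv_contains_filter_drop s (j :: d) i hlt]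
    exact (ih hs' hd).cons i
  | case4 i s j d hij hji ih =>
    intro hs hd
    obtain ⟨hsi, hs'⟩ := List.pairwise_cons.mp hs
    obtain ⟨hdj, hd'⟩ := List.pairwise_cons.mp hd
    have h1 : j ≠ i := ne_of_lt hji
    have h2 : j ∉ s := fun hm => absurd (hji.trans ((List.pairwise_cons.mp hs).1 j hm)) (lt_irrefl j)
    have hfc : List.filter (fun x => !(PySem.Set.contains (i :: s) x)) (j :: d) =
        j :: List.filter (fun x => !(PySem.Set.contains (i :: s) x)) d := by
      simp [h1, h2]
    rw [hfc]
    exact ((ih hs hd').cons j).trans List.perm_middle.symm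
  | case5 i s j d hij hji ih =>
    intro hs hd
    have hej : i = j := le_antisymm (not_lt.mp hji) (not_lt.mp hij)
    subst hej
    obtain ⟨hsi, hs'⟩ := List.pairwise_cons.mp hs
    obtain ⟨hdi, hd'⟩ := List.pairwise_cons.mp hd
    have hfc : List.filter (fun x => !(PySem.Set.contains (i :: s) x)) (i :: d) =
        List.filter (fun x => !(PySem.Set.contains (i :: s) x)) d := by
      simp
    rw [hfc, pv_contains_filter_drop s d i hdi, List.cons_append]
    exact (ih hs' hd').cons i

lemma pv_get?_none_iff (xs : List (String × List (String × String))) (k : String) :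
    (PySem.Dict.mk xs).get? k = none ↔ k ∉ PySem.Set.ofList (xs.map (fun p => p.1)) := by
  rw [PySem.Dict.get?_eq_none_iff_not_mem_keys, PySem.Dict.keys_mk, PySem.Set.mem_ofList]

-- B's merge loop produces exactly A's per-key records, grouped along the merged key list
lemma pv_rows_eq (single double : List (String × List (String × String))) (s d : List String) :
    (∀ k ∈ s, (PySem.Dict.mk single).get? k ≠ none) →
    (∀ k ∈ d, (PySem.Dict.mk double).get? k ≠ none) →
    (∀ k ∈ s, k ∉ d → (PySem.Dict.mk double).get? k = none) →
    (∀ k ∈ d, k ∉ s → (PySem.Dict.mk single).get? k = none) →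
    s.Pairwise (· < ·) → d.Pairwise (· < ·) →
    pvMergeRows single double s d = (pvMergeKeys s d).flatMap (pvStepA single double) := by
  fun_induction pvMergeRows single double s d with
  | case1 => intro _ _ _ _ _ _; simp [pvMergeKeys]
  | case2 i sk ih =>
    intro hs1 hd1 hs2 hd2 hss hds
    obtain ⟨hsi, hss'⟩ := List.pairwise_cons.mp hss
    have hstep : pvStepA single double i = [pvRecS i] := by
      obtain ⟨sv, hsv⟩ := Option.ne_none_iff_exists'.mp (hs1 i (by simp))
      unfold pvStepA
      rw [hsv, hs2 i (by simp) (by simp)]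
    rw [show pvMergeKeys (i :: sk) [] = i :: sk from by simp [pvMergeKeys], List.flatMap_cons, hstep,
      ih (fun k hk => hs1 k (by simp [hk])) hd1
        (fun k hk hk2 => hs2 k (by simp [hk]) hk2)
        (fun k hk _ => absurd hk (List.not_mem_nil)) hss' hds]
    simp [pvRecS, pvMergeKeys_nil_right]
  | case3 j dk ih =>
    intro hs1 hd1 hs2 hd2 hss hds
    obtain ⟨hdj, hds'⟩ := List.pairwise_cons.mp hds
    have hstep : pvStepA single double j = [pvRecD j] := by
      unfold pvStepA
      rw [hd2 j (by simp) (by simp)]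
    rw [show pvMergeKeys [] (j :: dk) = j :: dk from by simp [pvMergeKeys], List.flatMap_cons, hstep,
      ih (fun k hk => absurd hk (List.not_mem_nil)) (fun k hk => hd1 k (by simp [hk]))
        (fun k hk _ => absurd hk (List.not_mem_nil))
        (fun k hk _ => hd2 k (by simp [hk]) (by simp)) hss hds']
    simp [pvRecD, pvMergeKeys_nil_left]
  | case4 i sk j dk hij ih =>
    intro hs1 hd1 hs2 hd2 hss hds
    obtain ⟨hsi, hss'⟩ := List.pairwise_cons.mp hss
    obtain ⟨hdj, hds'⟩ := List.pairwise_cons.mp hds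
    have hnd : i ∉ j :: dk := by
      intro hm
      rcases List.mem_cons.mp hm with rfl | hm
      · exact absurd hij (lt_irrefl i)
      · exact absurd (hij.trans (hdj i hm)) (lt_irrefl i)
    have hstep : pvStepA single double i = [pvRecS i] := by
      obtain ⟨sv, hsv⟩ := Option.ne_none_iff_exists'.mp (hs1 i (by simp))
      unfold pvStepA
      rw [hsv, hs2 i (by simp) hnd]
    rw [show pvMergeKeys (i :: sk) (j :: dk) = i :: pvMergeKeys sk (j :: dk) from by
        simp [pvMergeKeys, hij],
      List.flatMap_cons, hstep,
      ih (fun k hk => hs1 k (by simp [hk])) hd1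
        (fun k hk hk2 => hs2 k (by simp [hk]) hk2)
        (fun k hk hk2 => hd2 k hk (by
          intro hm
          rcases List.mem_cons.mp hm with rfl | hm
          · rcases List.mem_cons.mp hk with rfl | hk
            · exact absurd hij (lt_irrefl k)
            · exact absurd (hij.trans (hdj k hk)) (lt_irrefl k)
          · exact hk2 hm)) hss' hds]
    simp [pvRecS]
  | case5 i sk j dk hij hji ih =>
    intro hs1 hd1 hs2 hd2 hss hds
    obtain ⟨hsi, hss'⟩ := List.pairwise_cons.mp hss
    obtain ⟨hdj, hds'⟩ := List.pairwise_cons.mp hds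
    have hns : j ∉ i :: sk := by
      intro hm
      rcases List.mem_cons.mp hm with rfl | hm
      · exact absurd hji (lt_irrefl j)
      · exact absurd (hji.trans (hsi j hm)) (lt_irrefl j)
    have hstep : pvStepA single double j = [pvRecD j] := by
      unfold pvStepA
      rw [hd2 j (by simp) hns]
    rw [show pvMergeKeys (i :: sk) (j :: dk) = j :: pvMergeKeys (i :: sk) dk from by
        simp [pvMergeKeys, hij, hji],
      List.flatMap_cons, hstep,
      ih hs1 (fun k hk => hd1 k (by simp [hk]))
        (fun k hk hk2 => hs2 k hk (by
          intro hm
          rcases List.mem_cons.mp hm with rfl | hm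
          · rcases List.mem_cons.mp hk with rfl | hk
            · exact absurd hji (lt_irrefl k)
            · exact absurd (hji.trans (hsi k hk)) (lt_irrefl k)
          · exact hk2 hm))
        (fun k hk hk2 => hd2 k (by simp [hk]) hk2) hss hds']
    simp [pvRecD]
  | case6 i sk j dk hij hji ih =>
    intro hs1 hd1 hs2 hd2 hss hds
    have hej : i = j := le_antisymm (not_lt.mp hji) (not_lt.mp hij)
    subst hej
    obtain ⟨hsi, hss'⟩ := List.pairwise_cons.mp hss
    obtain ⟨hdi, hds'⟩ := List.pairwise_cons.mp hds
    obtain ⟨sv, hsv⟩ := Option.ne_none_iff_exists'.mp (hs1 i (by simp))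
    obtain ⟨dv, hdv⟩ := Option.ne_none_iff_exists'.mp (hd1 i (by simp))
    have hstep : pvStepA single double i = pvChanged i sv dv := by
      unfold pvStepA
      rw [hsv, hdv]
    rw [show pvMergeKeys (i :: sk) (i :: dk) = i :: pvMergeKeys sk dk from by
        simp [pvMergeKeys],
      List.flatMap_cons, hstep,
      PySem.Dict.getD_eq_get?_getD, PySem.Dict.getD_eq_get?_getD, hsv, hdv,
      ih (fun k hk => hs1 k (by simp [hk])) (fun k hk => hd1 k (by simp [hk]))
        (fun k hk hk2 => hs2 k (by simp [hk]) (by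
          intro hm
          rcases List.mem_cons.mp hm with rfl | hm
          · exact absurd (hsi k hk) (lt_irrefl k)
          · exact hk2 hm))
        (fun k hk hk2 => hd2 k (by simp [hk]) (by
          intro hm
          rcases List.mem_cons.mp hm with rfl | hm
          · exact absurd (hdi k hk) (lt_irrefl k)
          · exact hk2 hm)) hss' hds']
    rfl

theorem pv_main (single double : List (String × List (String × String))) :
    compare_validation_alt single double = compare_validation single double := by
  set sk := PySem.Set.ofList (single.map (fun p => p.1)) with hsk
  set dk := PySem.Set.ofList (double.map (fun p => p.1)) with hdk
  set s := PySem.List.sorted sk (fun x => x) with hs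
  set d := PySem.List.sorted dk (fun x => x) with hd
  have hms : ∀ k, k ∈ s ↔ k ∈ sk := fun k => by
    rw [hs, PySem.List.mem_sorted]
  have hmd : ∀ k, k ∈ d ↔ k ∈ dk := fun k => by
    rw [hd, PySem.List.mem_sorted]
  have hss : s.Pairwise (· < ·) := by
    rw [hs, hsk]; exact PySem.List.sorted_ofList_pairwise_lt _
  have hds : d.Pairwise (· < ·) := by
    rw [hd, hdk]; exact PySem.List.sorted_ofList_pairwise_lt _
  -- the merged key list is exactly A's sorted union
  have hkeys : pvMergeKeys s d = PySem.List.sorted (PySem.Set.union sk dk) (fun x => x) := by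
    have hU : PySem.Set.union sk dk = sk ++ PySem.Set.diff dk sk := by
      show PySem.Set.update sk dk = _
      rw [PySem.Set.update_eq_append_filter, PySem.Set.ofList_eq_self_of_nodup dk (PySem.Set.nodup_ofList _)]
      rfl
    have hfilter : d.filter (fun x => !(PySem.Set.contains s x)) =
        d.filter (fun x => !(PySem.Set.contains sk x)) := by
      refine List.filter_congr ?_
      intro k hk
      rw [pv_contains_mem, pv_contains_mem, decide_eq_decide.mpr (hms k)]
    have hperm : (pvMergeKeys s d).Perm (PySem.Set.union sk dk) := by
      refine (pv_mergeKeys_perm s d hss hds).trans ?_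
      rw [hU, hfilter]
      exact (PySem.List.sorted_perm sk (fun x => x) false).append
        ((PySem.List.sorted_perm dk (fun x => x) false).filter _)
    exact (PySem.List.sorted_eq_of_perm_of_pairwise_lt _ _ (fun x => x) hperm (pv_mergeKeys_pairwise s d hss hds)).symm
  -- the side conditions of pv_rows_eq
  have hs1 : ∀ k ∈ s, (PySem.Dict.mk single).get? k ≠ none := by
    intro k hk h
    exact ((pv_get?_none_iff single k).mp h) ((hms k).mp hk)
  have hd1 : ∀ k ∈ d, (PySem.Dict.mk double).get? k ≠ none := by
    intro k hk h
    exact ((pv_get?_none_iff double k).mp h) ((hmd k).mp hk)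
  have hs2 : ∀ k ∈ s, k ∉ d → (PySem.Dict.mk double).get? k = none := by
    intro k _ hk2
    exact (pv_get?_none_iff double k).mpr (fun hm => hk2 ((hmd k).mpr hm))
  have hd2 : ∀ k ∈ d, k ∉ s → (PySem.Dict.mk single).get? k = none := by
    intro k _ hk2
    exact (pv_get?_none_iff single k).mpr (fun hm => hk2 ((hms k).mpr hm))
  rw [compare_validation_alt, pvA_eq_flatMap, ← hsk, ← hdk, ← hs, ← hd, ← hkeys]
  exact pv_rows_eq single double s d hs1 hd1 hs2 hd2 hss hds

-- ===== VERDICT (by name: the statement is the Claim_ definition above) =====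
theorem compare_validation_spec : Claim_equal_compare_validation := by
  intro single double _
  unfold Spec_compare_validation
  exact (pv_main single double).symm
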